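-- pv_equiv track=rewrite | github.com/SINCHANA82/QR_Secret_Sharing | app.py | split_secret
-- ===== SOURCE A (Python) =====
-- def split_secret(secret, num_shares):
--     share_length = len(secret) // num_shares
--     remainder = len(secret) % num_shares
--     shares = []
--     start = 0
--     for i in range(num_shares):
--         length = share_length + (1 if i < remainder else 0)
--         shares.append(secret[start: start + length])
--         start += length
--     return shares
-- ===== SOURCE B (Python) =====
-- def split_secret(secret, num_shares):
--     shares = []
--     rest = secret
--     k = num_shares
--     while k > 0:
--         cut = -(-len(rest) // k)   # ceil division: first chunk of what's left gets an extra char iff any remain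
--         shares.append(rest[:cut])
--         rest = rest[cut:]
--         k -= 1
--     return shares
-- ===== Notes on version B (the rewrite author's own statement) =====
-- stated objective: alternative
-- what changed: B drops A's precomputed share_length/remainder and running start pointer: it repeatedly peels the first chunk of ceiling-division length ceil(len(rest)/k) off a shrinking rest string while counting k down, so chunk sizes fall out of re-dividing the remainder instead of an i<remainder branch.
import Mathlib
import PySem

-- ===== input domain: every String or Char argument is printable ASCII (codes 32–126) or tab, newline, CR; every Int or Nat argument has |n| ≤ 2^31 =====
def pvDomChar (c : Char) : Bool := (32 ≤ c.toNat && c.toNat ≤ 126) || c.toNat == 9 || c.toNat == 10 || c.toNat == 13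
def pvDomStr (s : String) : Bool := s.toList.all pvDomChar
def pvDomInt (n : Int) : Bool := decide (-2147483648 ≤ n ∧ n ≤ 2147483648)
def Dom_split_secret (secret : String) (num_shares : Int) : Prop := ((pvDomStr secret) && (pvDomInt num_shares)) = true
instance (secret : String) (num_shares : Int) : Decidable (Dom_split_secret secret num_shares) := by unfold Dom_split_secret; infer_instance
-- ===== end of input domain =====

-- B replaces A's running start pointer and precomputed share_length/remainder by a peeling loop: it repeatedly
-- slices off the first chunk of ceiling-division length from a shrinking rest string while counting k down;
-- objective: alternative decomposition (B copies the remainder each step, so it is not faster).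


-- ===== PORT A =====
def split_secret (secret : String) (num_shares : Int) : List String :=
  let share_length := PySem.Int.floordiv (PySem.Str.len secret) num_shares
  let remainder := PySem.Int.mod (PySem.Str.len secret) num_shares
  let final := (PySem.List.pyRange 0 num_shares 1).foldl
    (fun (st : List String × Int) i =>
      let length := share_length + (if i < remainder then 1 else 0)
      (st.1 ++ [PySem.Str.slice secret (some st.2) (some (st.2 + length))], st.2 + length))
    (([] : List String), (0 : Int))
  final.1

-- ===== PORT B =====
-- the while loop of Source B over state (shares, rest, k)
def splitPeel (shares : List String) (rest : String) (k : Int) : List String :=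
  if h : k ≤ 0 then shares
  else
    let cut := -(PySem.Int.floordiv (-(PySem.Str.len rest)) k)
    splitPeel (shares ++ [PySem.Str.slice rest none (some cut)])
      (PySem.Str.slice rest (some cut) none) (k - 1)
termination_by k.toNat
decreasing_by omega

def split_secret_alt (secret : String) (num_shares : Int) : List String :=
  splitPeel [] secret num_shares

-- ===== PRECONDITION & SPEC =====
-- Python A raises ZeroDivisionError when num_shares = 0 (len(secret) // 0); excluded.
def Pre_split_secret (secret : String) (num_shares : Int) : Prop := num_shares ≠ 0
instance (secret : String) (num_shares : Int) : Decidable (Pre_split_secret secret num_shares) := by unfold Pre_split_secret; infer_instance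

def pvWitness_split_secret : String × Int := ("abcdefg", 3)

def Spec_split_secret (secret : String) (num_shares : Int) (out : List String) : Prop := out = split_secret_alt secret num_shares
instance (secret : String) (num_shares : Int) (out : List String) : Decidable (Spec_split_secret secret num_shares out) := by unfold Spec_split_secret; infer_instance

-- ===== CLAIM (what is proved, stated in full; the proofs are below) =====
def Claim_equal_split_secret : Prop := ∀ (secret : String) (num_shares : Int), Dom_split_secret secret num_shares → Pre_split_secret secret num_shares → Spec_split_secret secret num_shares (split_secret secret num_shares)

-- ===== LEMMAS AND PROOFS =====

lemma str_ext {s t : String} (h : s.toList = t.toList) : s = t := by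
  have := congrArg String.ofList h
  simpa using this

-- boundary arithmetic: A's running start at iteration i equals the closed form i*d + min i r
lemma boundary_step (d r i : Int) :
    i * d + min i r + (d + (if i < r then 1 else 0)) = (i + 1) * d + min (i + 1) r := by
  split_ifs with h
  · have : min i r = i := by omega
    have : min (i + 1) r = i + 1 := by omega
    nlinarith [min_def i r, min_def (i+1) r]
  · have h1 : min i r = r := by omega
    have h2 : min (i + 1) r = r := by omega
    rw [h1, h2]; ring

-- loop invariant for A: folding A's step over [j, k) starting at boundary j yields the closed-form map
lemma loop_inv (secret : String) (d r : Int) (k j : Int) (hjk : j ≤ k) (acc : List String) :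
    ((PySem.List.pyRange j k 1).foldl
      (fun (st : List String × Int) i =>
        let length := d + (if i < r then 1 else 0)
        (st.1 ++ [PySem.Str.slice secret (some st.2) (some (st.2 + length))], st.2 + length))
      (acc, j * d + min j r)).1
    = acc ++ (PySem.List.pyRange j k 1).map
        (fun i => PySem.Str.slice secret (some (i * d + min i r)) (some ((i + 1) * d + min (i + 1) r))) := by
  generalize hm : (k - j).toNat = m
  induction m generalizing j acc with
  | zero =>
      have hkj : k ≤ j := by omega
      have hjk' : j = k := le_antisymm hjk hkj
      subst hjk'
      rw [PySem.List.pyRange_one_eq_nil le_rfl]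
      simp
  | succ m ih =>
      have hlt : j < k := by omega
      rw [PySem.List.pyRange_one_cons hlt]
      simp only [List.foldl_cons, List.map_cons]
      have hstep : j * d + min j r + (d + (if j < r then 1 else 0)) = (j + 1) * d + min (j + 1) r :=
        boundary_step d r j
      rw [hstep]
      have := ih (j + 1) (by omega)
        (acc ++ [PySem.Str.slice secret (some (j * d + min j r)) (some ((j + 1) * d + min (j + 1) r))])
        (by omega)
      simp only at this ⊢
      rw [this]
      simp

-- index shift for ranges
lemma pyRange_shift (a b : Int) :
    PySem.List.pyRange (a + 1) (b + 1) 1 = (PySem.List.pyRange a b 1).map (· + 1) := by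
  generalize hm : (b - a).toNat = m
  induction m generalizing a with
  | zero =>
      rw [PySem.List.pyRange_one_eq_nil (by omega), PySem.List.pyRange_one_eq_nil (by omega)]
      rfl
  | succ m ih =>
      have hab : a < b := by omega
      rw [PySem.List.pyRange_one_cons (by omega : a + 1 < b + 1), PySem.List.pyRange_one_cons hab,
        List.map_cons, ih (a + 1) (by omega)]

-- slicing a dropped list is slicing the original with shifted bounds
lemma slice_drop {α : Type} (l : List α) (c x y : Int) (hc : 0 ≤ c) (hx : 0 ≤ x) (hy : 0 ≤ y) :
    PySem.List.slice (l.drop c.toNat) (some x) (some y)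
      = PySem.List.slice l (some (c + x)) (some (c + y)) := by
  rw [PySem.List.slice_toNat _ hx hy, PySem.List.slice_toNat _ (by omega) (by omega), List.drop_drop]
  congr 1
  · omega
  · congr 1; omega

-- boundary shift: peeling the first chunk of length d + min 1 r moves boundary j of the rest to boundary j+1 of the whole
lemma bshift (d r j : Int) (hr : 0 ≤ r) (hj : 0 ≤ j) :
    (d + min 1 r) + (j * d + min j (r - min 1 r)) = (j + 1) * d + min (j + 1) r := by
  rw [show (j + 1) * d = j * d + d from by ring]
  generalize j * d = t
  omega

lemma pyRange_shift' (k : Int) :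
    PySem.List.pyRange 1 k 1 = (PySem.List.pyRange 0 (k - 1) 1).map (· + 1) := by
  have h := pyRange_shift 0 (k - 1)
  rw [zero_add, sub_add_cancel] at h
  exact h

-- B's recursion computes the closed-form chunk map
lemma alt_eq_map (m : Nat) : ∀ (k : Int) (s : String) (acc : List String), k.toNat = m →
    splitPeel acc s k = acc ++ (PySem.List.pyRange 0 k 1).map
      (fun i => PySem.Str.slice s
        (some (i * PySem.Int.floordiv (PySem.Str.len s) k + min i (PySem.Int.mod (PySem.Str.len s) k)))
        (some ((i + 1) * PySem.Int.floordiv (PySem.Str.len s) k + min (i + 1) (PySem.Int.mod (PySem.Str.len s) k)))) := by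
  induction m with
  | zero =>
      intro k s acc hm
      have hk : k ≤ 0 := by omega
      rw [splitPeel, dif_pos hk, PySem.List.pyRange_one_eq_nil hk, List.map_nil, List.append_nil]
  | succ m ih =>
      intro k s acc hm
      have hk : 0 < k := by omega
      set n := PySem.Str.len s with hn
      set d := PySem.Int.floordiv n k with hd
      set r := PySem.Int.mod n k with hr
      have hn0 : 0 ≤ n := by rw [hn, PySem.Str.len_eq]; positivity
      have hr0 : 0 ≤ r := PySem.Int.mod_nonneg n hk
      have hrk : r < k := PySem.Int.mod_lt n hk
      have heq : d * k + r = n := PySem.Int.floordiv_mul_add_mod n k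
      have hd0 : 0 ≤ d := by nlinarith
      -- the ceiling-division cut equals d + min 1 r
      have hcut : -(PySem.Int.floordiv (-n) k) = d + min 1 r := by
        rw [PySem.Int.neg_floordiv_neg_eq_iff_of_pos hk]
        rw [show (d + min 1 r - 1) * k = d * k + (min 1 r - 1) * k from by ring,
            show (d + min 1 r) * k = d * k + min 1 r * k from by ring]
        rcases eq_or_lt_of_le hr0 with h0 | hpos
        · rw [show min (1:Int) r = 0 from by omega]
          constructor <;> nlinarith
        · rw [show min (1:Int) r = 1 from by omega]
          constructor <;> nlinarith
      have hcle : d + min 1 r ≤ n := by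
        rcases eq_or_lt_of_le hr0 with h0 | hpos
        · rw [show min (1:Int) r = 0 from by omega]; nlinarith
        · rw [show min (1:Int) r = 1 from by omega]; nlinarith
      have hc0 : 0 ≤ d + min 1 r := by omega
      -- length of the remaining string
      have htl : (PySem.Str.slice s (some (-(PySem.Int.floordiv (-n) k))) none).toList
          = s.toList.drop (d + min 1 r).toNat := by
        rw [PySem.Str.toList_slice, PySem.Chars.slice_eq_listSlice, hcut,
          PySem.List.slice_from _ hc0]
      have hlen' : PySem.Str.len (PySem.Str.slice s (some (-(PySem.Int.floordiv (-n) k))) none)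
          = n - (d + min 1 r) := by
        rw [PySem.Str.len_eq, htl, List.length_drop]
        have : n = (s.toList.length : Int) := by rw [hn, PySem.Str.len_eq]
        omega
      -- d and r of the remaining string (only meaningful when k ≥ 2; used under membership j < k-1)
      rw [splitPeel, dif_neg (by omega)]
      simp only
      rw [ih (k - 1) _ _ (by omega), List.append_assoc]
      refine congrArg (acc ++ ·) ?_
      rw [PySem.List.pyRange_one_cons hk, List.map_cons, show (0 : Int) + 1 = 1 from rfl,
        pyRange_shift', List.map_map, List.singleton_append, List.cons.injEq]
      refine ⟨?_, ?_⟩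
      · -- head chunk
        apply str_ext
        rw [PySem.Str.toList_slice, PySem.Str.toList_slice, PySem.Chars.slice_eq_listSlice,
          PySem.Chars.slice_eq_listSlice, hcut]
        rw [show (0 : Int) * d + min 0 r = 0 from by omega, PySem.List.slice_zero_start]
        congr 2
        omega
      · -- tail chunks
        apply List.map_congr_left
        intro j hj
        rw [PySem.List.mem_pyRange_one] at hj
        obtain ⟨hj0, hjk1⟩ := hj
        have hk2 : 2 ≤ k := by omega
        have hk1 : 0 < k - 1 := by omega
        set n' := n - (d + min 1 r) with hn'
        have hne : n' = d * (k - 1) + (r - min 1 r) := by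
          rw [show d * (k - 1) = d * k - d from by ring]
          omega
        have hd' : PySem.Int.floordiv n' (k - 1) = d := by
          rw [PySem.Int.floordiv_eq_iff_of_pos hk1, hne,
            show (d + 1) * (k - 1) = d * (k - 1) + (k - 1) from by ring]
          generalize d * (k - 1) = t
          omega
        have hr' : PySem.Int.mod n' (k - 1) = r - min 1 r := by
          have := PySem.Int.floordiv_mul_add_mod n' (k - 1)
          rw [hd'] at this
          rw [show d * (k - 1) = d * k - d from by ring] at this
          omega
        have hx1 : 0 ≤ j * d + min j (r - min 1 r) :=
          add_nonneg (mul_nonneg hj0 hd0) (le_min hj0 (by omega))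
        have hx2 : 0 ≤ (j + 1) * d + min (j + 1) (r - min 1 r) :=
          add_nonneg (mul_nonneg (by omega) hd0) (le_min (by omega) (by omega))
        simp only [Function.comp]
        apply str_ext
        simp only [PySem.Str.toList_slice, PySem.Chars.slice_eq_listSlice]
        rw [hlen', hd', hr', ← hn, hcut,
          PySem.List.slice_from _ hc0, slice_drop _ _ _ _ hc0 hx1 hx2,
          bshift d r j hr0 hj0, bshift d r (j + 1) hr0 (by omega)]

-- ===== VERDICT (by name: the statement is the Claim_ definition above) =====
theorem split_secret_spec : Claim_equal_split_secret := by
  intro secret num_shares _ hpre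
  unfold Spec_split_secret
  unfold split_secret_alt
  rw [alt_eq_map num_shares.toNat num_shares secret [] rfl, List.nil_append]
  unfold split_secret
  rcases lt_trichotomy num_shares 0 with hneg | hzero | hpos
  · rw [PySem.List.pyRange_one_eq_nil (by omega)]
    simp
  · exact absurd hzero hpre
  · have hr : 0 ≤ PySem.Int.mod (PySem.Str.len secret) num_shares :=
      PySem.Int.mod_nonneg _ hpos
    have h0 : (0 : Int) * PySem.Int.floordiv (PySem.Str.len secret) num_shares
        + min 0 (PySem.Int.mod (PySem.Str.len secret) num_shares) = 0 := by
      rw [zero_mul, zero_add, min_eq_left hr]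
    have := loop_inv secret (PySem.Int.floordiv (PySem.Str.len secret) num_shares)
      (PySem.Int.mod (PySem.Str.len secret) num_shares) num_shares 0 (by omega) []
    rw [h0] at this
    simpa using this
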